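-- pv_equiv track=rewrite | github.com/adaball/cw-practice-py | is_interesting.py | is_sequential_inc
-- ===== SOURCE A (Python) =====
-- def is_sequential_inc(number):
--     num_str = str(number)
--
--     def next_expected(n):
--         if n == 9:
--             return "0"
--         else:
--             return str(n + 1)
--
--     i = 0
--     while i <= len(num_str) - 2:
--         curr_str = num_str[i]
--         next_str = num_str[i + 1]
--
--         expected = next_expected(int(curr_str))
--         if next_str != expected:
--             return False
--
--         i += 1
--
--     return True
-- ===== SOURCE B (Python) =====
-- def is_sequential_inc(number):
--     num_str = str(number)
--     if len(num_str) < 2: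
--         return True
--     start = int(num_str[0])
--     expected = ''.join(str((start + i) % 10) for i in range(len(num_str)))
--     return num_str == expected
-- ===== Notes on version B (the rewrite author's own statement) =====
-- stated objective: simpler
-- what changed: Instead of scanning every adjacent digit pair with an index loop and a next_expected helper, B reconstructs the whole expected incrementing string (each position is the first digit advanced and wrapped modulo ten) and compares it to the digit string in one shot; Pre_ excludes negative numbers, on which both A and B raise ValueError when int() meets the minus sign.
import Mathlib
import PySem

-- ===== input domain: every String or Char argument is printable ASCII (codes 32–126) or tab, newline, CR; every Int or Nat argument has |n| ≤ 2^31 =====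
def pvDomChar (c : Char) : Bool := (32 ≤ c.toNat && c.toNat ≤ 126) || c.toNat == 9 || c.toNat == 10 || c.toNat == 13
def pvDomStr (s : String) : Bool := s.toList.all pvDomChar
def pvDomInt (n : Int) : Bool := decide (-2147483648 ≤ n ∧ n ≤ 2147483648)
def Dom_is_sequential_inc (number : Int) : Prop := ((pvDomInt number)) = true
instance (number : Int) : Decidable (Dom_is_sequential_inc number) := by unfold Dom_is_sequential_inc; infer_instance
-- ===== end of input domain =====

-- B rebuilds the whole expected incrementing digit string from the first digit alone and compares once,
-- instead of A's index loop over every adjacent digit pair (objective: simpler).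

-- ===== PORT A =====
-- helper next_expected(n)
def pvNextExpected (n : Int) : List Char :=
  if n = 9 then ['0'] else PySem.Int.toChars (n + 1)

-- the while-loop over i: at each step compares num_str[i+1] with next_expected(int(num_str[i]))
def pvLoopA : List Char → Bool
  | c1 :: c2 :: rest =>
    match PySem.Int.ofChars? [c1] with
    | none => false  -- int(curr_str) raises ValueError in Python; such inputs lie outside Pre_
    | some n => if [c2] ≠ pvNextExpected n then false else pvLoopA (c2 :: rest)
  | _ => true

def is_sequential_inc (number : Int) : Bool :=
  pvLoopA (PySem.Int.toChars number)

-- ===== PORT B =====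
def is_sequential_inc_alt (number : Int) : Bool :=
  let cs := PySem.Int.toChars number
  if PySem.List.len cs < 2 then true
  else
    match PySem.List.pyGet? cs 0 with
    | none => false  -- unreachable: str(number) is never empty
    | some c0 =>
      match PySem.Int.ofChars? [c0] with
      | none => false  -- int(num_str[0]) raises ValueError in Python; such inputs lie outside Pre_
      | some start =>
        let expected :=
          (PySem.List.pyRange 0 (PySem.List.len cs) 1).flatMap
            (fun i => PySem.Int.toChars (PySem.Int.mod (start + i) 10))
        decide (cs = expected)

-- ===== PRECONDITION & SPEC =====
-- Pre_ excludes exactly the negative numbers: there str(number) starts with '-' and A raises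
-- ValueError from int('-') (B raises the same way); A returns normally on every number ≥ 0.
def Pre_is_sequential_inc (number : Int) : Prop := 0 ≤ number
instance (number : Int) : Decidable (Pre_is_sequential_inc number) := by unfold Pre_is_sequential_inc; infer_instance
def pvWitness_is_sequential_inc : Int := 123

def Spec_is_sequential_inc (number : Int) (out : Bool) : Prop := out = is_sequential_inc_alt number
instance (number : Int) (out : Bool) : Decidable (Spec_is_sequential_inc number out) := by unfold Spec_is_sequential_inc; infer_instance

-- ===== CLAIM (what is proved, stated in full; the proofs are below) =====
def Claim_equal_is_sequential_inc : Prop := ∀ (number : Int), Dom_is_sequential_inc number → Pre_is_sequential_inc number → Spec_is_sequential_inc number (is_sequential_inc number)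

-- ===== LEMMAS AND PROOFS =====

-- "c is a decimal digit character"
def pvDigit (c : Char) : Prop := ∃ d : Nat, d < 10 ∧ c = Nat.digitChar d

-- the incrementing digit sequence of length k starting at digit d (mod 10 at every position)
def pvSeq (d : Nat) : Nat → List Char
  | 0 => []
  | k + 1 => Nat.digitChar (d % 10) :: pvSeq (d + 1) k

theorem pvOfChars_digit (d : Nat) (h : d < 10) :
    PySem.Int.ofChars? [Nat.digitChar d] = some (d : Int) := by
  interval_cases d <;> decide

theorem pvNextExpected_digit (d : Nat) (h : d < 10) :
    pvNextExpected (d : Int) = [Nat.digitChar ((d + 1) % 10)] := by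
  interval_cases d <;> decide

theorem pvDigitChar_inj (d e : Nat) (hd : d < 10) (he : e < 10) :
    Nat.digitChar d = Nat.digitChar e ↔ d = e := by
  interval_cases d <;> interval_cases e <;> decide

theorem pvSeq_mod (k : Nat) : ∀ d : Nat, pvSeq (d % 10) k = pvSeq d k := by
  induction k with
  | zero => intro d; rfl
  | succ k ih =>
    intro d
    show Nat.digitChar (d % 10 % 10) :: pvSeq (d % 10 + 1) k
        = Nat.digitChar (d % 10) :: pvSeq (d + 1) k
    have h1 : d % 10 % 10 = d % 10 := by omega
    have h2 : (d % 10 + 1) % 10 = (d + 1) % 10 := by omega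
    rw [h1, ← ih (d % 10 + 1), h2, ih (d + 1)]

theorem pvLoopA_eq (cs : List Char) : ∀ d : Nat, d < 10 → (∀ c ∈ cs, pvDigit c) →
    pvLoopA (Nat.digitChar d :: cs) = decide (Nat.digitChar d :: cs = pvSeq d (cs.length + 1)) := by
  induction cs with
  | nil =>
    intro d hd _
    have hmod : d % 10 = d := Nat.mod_eq_of_lt hd
    simp [pvLoopA, pvSeq, hmod]
  | cons c2 rest ih =>
    intro d hd hP
    obtain ⟨e, he, rfl⟩ := hP c2 (by simp)
    have hrest : ∀ c ∈ rest, pvDigit c := fun c hc => hP c (by simp [hc])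
    have hmodd : d % 10 = d := Nat.mod_eq_of_lt hd
    have hm : (d + 1) % 10 < 10 := Nat.mod_lt _ (by norm_num)
    show pvLoopA (Nat.digitChar d :: Nat.digitChar e :: rest) = _
    rw [show pvLoopA (Nat.digitChar d :: Nat.digitChar e :: rest)
        = (match PySem.Int.ofChars? [Nat.digitChar d] with
           | none => false
           | some n => if [Nat.digitChar e] ≠ pvNextExpected n then false
                       else pvLoopA (Nat.digitChar e :: rest)) from rfl,
      pvOfChars_digit d hd]
    simp only [pvNextExpected_digit d hd]
    by_cases hee : e = (d + 1) % 10
    · subst hee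
      rw [if_neg (by simp), ih ((d + 1) % 10) hm hrest]
      show _ = decide (Nat.digitChar d :: Nat.digitChar ((d + 1) % 10) :: rest
          = Nat.digitChar (d % 10) :: pvSeq (d + 1) (rest.length + 1))
      rw [hmodd, ← pvSeq_mod (rest.length + 1) (d + 1)]
      simp [pvSeq]
    · have hne : Nat.digitChar e ≠ Nat.digitChar ((d + 1) % 10) := by
        rw [ne_eq, pvDigitChar_inj e ((d + 1) % 10) he hm]; exact hee
      rw [if_pos (by simp [hne])]
      show _ = decide (Nat.digitChar d :: Nat.digitChar e :: rest
          = Nat.digitChar (d % 10) :: pvSeq (d + 1) (rest.length + 1))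
      rw [← pvSeq_mod (rest.length + 1) (d + 1)]
      simp [pvSeq, hne]

theorem pvModCast (d j : Nat) :
    PySem.Int.mod ((d : Int) + (j : Int)) 10 = (((d + j) % 10 : Nat) : Int) := by
  rw [PySem.Int.mod_eq_emod_of_pos (by norm_num)]
  omega

theorem pvToCharsMod (m : Nat) :
    PySem.Int.toChars (((m % 10 : Nat) : Int)) = [Nat.digitChar (m % 10)] := by
  have h : m % 10 < 10 := Nat.mod_lt _ (by norm_num)
  generalize m % 10 = r at *
  interval_cases r <;> decide

theorem pvSeq_eq_map (k : Nat) : ∀ d : Nat,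
    pvSeq d k = (List.range k).map (fun j => Nat.digitChar ((d + j) % 10)) := by
  induction k with
  | zero => intro d; rfl
  | succ k ih =>
    intro d
    rw [List.range_succ_eq_map]
    show Nat.digitChar (d % 10) :: pvSeq (d + 1) k = _
    simp only [List.map_cons, List.map_map, Nat.add_zero, ih (d + 1)]
    congr 1
    apply List.map_congr_left
    intro j _
    simp [Function.comp]
    congr 1
    omega

theorem pvExpected_eq (k d : Nat) :
    (PySem.List.pyRange 0 (k : Int) 1).flatMap
        (fun i => PySem.Int.toChars (PySem.Int.mod ((d : Int) + i) 10))
      = pvSeq d k := by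
  rw [PySem.List.pyRange_zero_nat k, List.flatMap_map]
  have hpt : ∀ j : Nat, PySem.Int.toChars (PySem.Int.mod ((d : Int) + (j : Int)) 10)
      = [Nat.digitChar ((d + j) % 10)] := by
    intro j; rw [pvModCast, pvToCharsMod]
  simp only [hpt]
  rw [pvSeq_eq_map, ← List.map_eq_flatMap]

theorem pvCore_length (fuel : Nat) : ∀ (n : Nat) (ds : List Char),
    ds.length ≤ (Nat.toDigitsCore 10 fuel n ds).length := by
  induction fuel with
  | zero => intro n ds; simp [Nat.toDigitsCore]
  | succ fuel ih =>
    intro n ds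
    rw [Nat.toDigitsCore]
    split
    · simp
    · exact le_trans (by simp) (ih _ _)

theorem pvToDigits_ne_nil (m : Nat) : Nat.toDigits 10 m ≠ [] := by
  unfold Nat.toDigits
  rw [Nat.toDigitsCore]
  split
  · simp
  · intro h
    have := pvCore_length m (m / 10) [(m % 10).digitChar]
    rw [h] at this
    simp at this

theorem pvCore_digits (fuel : Nat) : ∀ (n : Nat) (ds : List Char),
    (∀ c ∈ ds, pvDigit c) → ∀ c ∈ Nat.toDigitsCore 10 fuel n ds, pvDigit c := by
  induction fuel with
  | zero => intro n ds h; simpa [Nat.toDigitsCore] using h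
  | succ fuel ih =>
    intro n ds h
    rw [Nat.toDigitsCore]
    have hd : pvDigit (n % 10).digitChar := ⟨n % 10, Nat.mod_lt _ (by norm_num), rfl⟩
    split
    · intro c hc
      rcases List.mem_cons.mp hc with h1 | h2
      · exact h1 ▸ hd
      · exact h c h2
    · apply ih
      intro c hc
      rcases List.mem_cons.mp hc with h1 | h2
      · exact h1 ▸ hd
      · exact h c h2

theorem pvToDigits_digits (m : Nat) : ∀ c ∈ Nat.toDigits 10 m, pvDigit c := by
  unfold Nat.toDigits
  exact pvCore_digits (m + 1) m [] (by simp)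

theorem pvToChars_nonneg (number : Int) (h : 0 ≤ number) :
    PySem.Int.toChars number = Nat.toDigits 10 number.toNat := by
  unfold PySem.Int.toChars
  rw [if_neg (by omega)]

-- ===== VERDICT (by name: the statement is the Claim_ definition above) =====
theorem is_sequential_inc_spec : Claim_equal_is_sequential_inc := by
  intro number _ hpre
  unfold Spec_is_sequential_inc is_sequential_inc is_sequential_inc_alt
  rw [pvToChars_nonneg number hpre]
  generalize hcs : Nat.toDigits 10 number.toNat = cs
  have hne : cs ≠ [] := hcs ▸ pvToDigits_ne_nil number.toNat
  have hP : ∀ c ∈ cs, pvDigit c := hcs ▸ pvToDigits_digits number.toNat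
  match cs, hne with
  | [c], _ => simp [pvLoopA, PySem.List.len_eq]
  | c1 :: c2 :: rest, _ =>
    obtain ⟨d, hd, rfl⟩ := hP c1 (by simp)
    have hlen : ¬ (PySem.List.len (Nat.digitChar d :: c2 :: rest) < 2) := by
      simp [PySem.List.len_eq]
    rw [pvLoopA_eq (c2 :: rest) d hd (fun c hc => hP c (by simp [List.mem_cons] at hc ⊢; tauto))]
    simp only [if_neg hlen, PySem.List.pyGet?_zero_cons, pvOfChars_digit d hd]
    have hlen2 : PySem.List.len (Nat.digitChar d :: c2 :: rest)
        = ((Nat.digitChar d :: c2 :: rest).length : Int) := by simp [PySem.List.len_eq]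
    rw [hlen2, pvExpected_eq (Nat.digitChar d :: c2 :: rest).length d]
    simp [List.length_cons]
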